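-- pv_equiv track=rewrite | github.com/daftpunk6161/ROM-Sorter-Pro | src/core/normalization.py | _resolve_platform_id
-- ===== SOURCE A (Python) =====
-- from typing import Any, Dict, Iterable, List, Literal, Optional, Tuple
--
-- def _resolve_platform_id(raw: Optional[str], formats: List[Dict[str, Any]]) -> Optional[str]:
--     if not raw:
--         return None
--     value = "-".join(str(raw).strip().lower().split())
--     if not value:
--         return None
--     known = {str(entry.get("platform_id")) for entry in formats if entry.get("platform_id")}
--     return value if value in known else None
-- ===== SOURCE B (Python) =====
-- def _resolve_platform_id(raw, formats):
--     if not raw: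
--         return None
--     # Single-pass normalizer: lowercase once, then one scan that copies
--     # non-space characters and collapses each interior whitespace run to '-'.
--     out = []
--     sep = False
--     for ch in str(raw).lower():
--         if ch.isspace():
--             if out:
--                 sep = True
--         else:
--             if sep:
--                 out.append('-')
--                 sep = False
--             out.append(ch)
--     if not out:
--         return None
--     value = ''.join(out)
--     for entry in formats:
--         pid = entry.get("platform_id")
--         if pid and str(pid) == value:
--             return value
--     return None
-- ===== Notes on version B (the rewrite author's own statement) =====
-- stated objective: alternative
-- what changed: B replaces A's strip/split/join pipeline plus a precomputed set with a single character-level scan that collapses whitespace runs to '-' while copying characters, followed by an early-exit scan of formats instead of building a membership set.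
import Mathlib
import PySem

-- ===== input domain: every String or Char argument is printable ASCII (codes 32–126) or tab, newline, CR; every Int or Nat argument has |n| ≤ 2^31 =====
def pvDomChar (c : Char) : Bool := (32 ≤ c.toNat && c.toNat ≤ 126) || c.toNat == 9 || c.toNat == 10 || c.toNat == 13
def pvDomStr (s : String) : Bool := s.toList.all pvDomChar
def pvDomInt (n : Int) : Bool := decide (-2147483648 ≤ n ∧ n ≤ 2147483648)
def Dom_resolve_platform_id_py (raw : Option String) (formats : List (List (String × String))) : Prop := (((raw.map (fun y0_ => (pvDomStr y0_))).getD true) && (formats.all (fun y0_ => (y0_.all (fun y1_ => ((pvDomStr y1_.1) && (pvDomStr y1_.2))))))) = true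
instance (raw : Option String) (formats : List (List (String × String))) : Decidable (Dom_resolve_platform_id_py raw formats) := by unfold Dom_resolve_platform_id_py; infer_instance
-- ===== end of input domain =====

-- B replaces A's strip/split/join pipeline + precomputed set by a single character scan that
-- collapses whitespace runs to '-' and an early-exit scan of formats (objective: alternative).


-- ===== PORT A =====
-- assoc-list first-match lookup = entry.get("platform_id")
def pvGetPid (e : List (String × String)) : Option String :=
  (e.find? (fun p => p.1 == "platform_id")).map (·.2)

def resolve_platform_id_py (raw : Option String) (formats : List (List (String × String))) : Option String :=
  match raw with
  | none => none
  | some r =>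
    if r = "" then none
    else
      let value := PySem.Str.join "-" (PySem.Str.split₀ (PySem.Str.lower (PySem.Str.strip r)))
      if value = "" then none
      else
        let known := PySem.Set.ofList (formats.filterMap (fun e =>
          match pvGetPid e with
          | some p => if p ≠ "" then some p else none
          | none => none))
        if value ∈ known then some value else none

-- ===== PORT B =====
-- one step of B's whitespace-collapsing scan; state = (chars emitted so far, pending-hyphen flag)
def pvStepB (st : List Char × Bool) (c : Char) : List Char × Bool :=
  if PySem.Chars.isspace c then (st.1, st.2 || !st.1.isEmpty)
  else ((if st.2 then st.1 ++ ['-'] else st.1) ++ [c], false)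

-- B's early-exit scan of formats
def pvScanB (value : String) : List (List (String × String)) → Option String
  | [] => none
  | e :: rest =>
    match pvGetPid e with
    | some p => if p ≠ "" ∧ p = value then some value else pvScanB value rest
    | none => pvScanB value rest

def resolve_platform_id_py_alt (raw : Option String) (formats : List (List (String × String))) : Option String :=
  match raw with
  | none => none
  | some r =>
    if r = "" then none
    else
      let out := ((PySem.Str.lower r).toList.foldl pvStepB ([], false)).1
      if out.isEmpty then none
      else pvScanB (String.ofList out) formats

-- ===== PRECONDITION & SPEC =====
def Spec_resolve_platform_id_py (raw : Option String) (formats : List (List (String × String))) (out : Option String) : Prop := out = resolve_platform_id_py_alt raw formats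
instance (raw : Option String) (formats : List (List (String × String))) (out : Option String) : Decidable (Spec_resolve_platform_id_py raw formats out) := by unfold Spec_resolve_platform_id_py; infer_instance

-- ===== CLAIM (what is proved, stated in full; the proofs are below) =====
def Claim_equal_resolve_platform_id_py : Prop := ∀ (raw : Option String) (formats : List (List (String × String))), Dom_resolve_platform_id_py raw formats → Spec_resolve_platform_id_py raw formats (resolve_platform_id_py raw formats)

-- ===== LEMMAS AND PROOFS =====

-- lowering a character does not change whether it is whitespace
theorem pv_isspace_lowerChar (c : Char) : PySem.Chars.isspace (PySem.Chars.lowerChar c) = PySem.Chars.isspace c := by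
  simp only [PySem.Chars.lowerChar, PySem.Chars.isupper, PySem.Chars.isspace]
  split
  · next h =>
    simp only [Bool.and_eq_true, decide_eq_true_eq, Char.le_def] at h
    have h65 : (65:Nat) ≤ c.toNat := h.1
    have h90 : c.toNat ≤ 90 := h.2
    have hvalid : (c.toNat + 32).isValidChar := Or.inl (by omega)
    rw [Char.toNat_ofNat, if_pos hvalid]
    have hL : ∀ m : Nat, 65 ≤ m → m ≤ 122 → (decide (m = 32) || decide (9 ≤ m) && decide (m ≤ 13) || decide (28 ≤ m) && decide (m ≤ 31) || decide (m = 133) || decide (m = 160) || decide (m = 5760) || decide (8192 ≤ m) && decide (m ≤ 8202) || decide (m = 8232) || decide (m = 8233) || decide (m = 8239) || decide (m = 8287) || decide (m = 12288)) = false := by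
      intro m hm1 hm2
      simp only [Bool.or_eq_false_iff, Bool.and_eq_false_iff, decide_eq_false_iff_not]
      omega
    rw [hL _ (by omega) (by omega), hL _ (by omega) (by omega)]
  · rfl

theorem pv_join_append_singleton (ws : List (List Char)) (w : List Char) (h : ws ≠ []) :
    PySem.Chars.join ['-'] (ws ++ [w]) = PySem.Chars.join ['-'] ws ++ '-' :: w := by
  induction ws with
  | nil => simp at h
  | cons a t ih =>
    cases t with
    | nil => simp [PySem.Chars.join_cons_cons, PySem.Chars.join_singleton]
    | cons b t' =>
      simp only [List.cons_append] at ih ⊢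
      rw [PySem.Chars.join_cons_cons, ih (by simp), PySem.Chars.join_cons_cons]
      simp

theorem pv_join_ne_nil (ws : List (List Char)) (hne : ws ≠ []) (hw : ∀ w ∈ ws, w ≠ []) :
    PySem.Chars.join ['-'] ws ≠ [] := by
  cases ws with
  | nil => simp at hne
  | cons a t =>
    cases t with
    | nil =>
      rw [PySem.Chars.join_singleton]
      exact hw a (by simp)
    | cons b t' =>
      rw [PySem.Chars.join_cons_cons]
      have := hw a (by simp)
      intro hc
      rcases List.append_eq_nil_iff.mp hc with ⟨h1, _⟩
      rcases List.append_eq_nil_iff.mp h1 with ⟨h2, _⟩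
      exact this h2

-- the words go's accumulator will produce if no further input arrives
def pvFin (cur : List Char) (acc : List (List Char)) : List (List Char) :=
  if cur.isEmpty then acc.reverse else (cur.reverse :: acc).reverse

-- B's fold, started in the state corresponding to go's (cur, acc), computes '-'.join of go's words
theorem pv_main (cs : List Char) : ∀ (cur : List Char) (acc : List (List Char)), (∀ w ∈ acc, w ≠ []) →
    (cs.foldl pvStepB (PySem.Chars.join ['-'] (pvFin cur acc), cur.isEmpty && !acc.isEmpty)).1
      = PySem.Chars.join ['-'] (PySem.Chars.split₀.go cs cur acc) := by
  induction cs with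
  | nil =>
    intro cur acc _
    simp [List.foldl_nil, PySem.Chars.split₀.go, pvFin]
  | cons c rest ih =>
    intro cur acc hacc
    by_cases hsp : PySem.Chars.isspace c = true
    · by_cases hcur : cur.isEmpty
      · have e1 : PySem.Chars.split₀.go (c :: rest) cur acc = PySem.Chars.split₀.go rest [] acc := by
          simp [PySem.Chars.split₀.go, hsp, hcur]
        have hcur' : cur = [] := by simpa using hcur
        subst hcur'
        rw [e1, List.foldl_cons]
        have e2 : pvStepB (PySem.Chars.join ['-'] (pvFin ([] : List Char) acc), List.isEmpty ([] : List Char) && !acc.isEmpty) c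
            = (PySem.Chars.join ['-'] (pvFin ([] : List Char) acc), List.isEmpty ([] : List Char) && !acc.isEmpty) := by
          simp only [pvStepB, hsp, if_true]
          cases acc with
          | nil => simp [pvFin]
          | cons a t =>
            have hne : PySem.Chars.join ['-'] (pvFin [] (a :: t)) ≠ [] := by
              apply pv_join_ne_nil
              · simp [pvFin]
              · intro w hw
                have hw' : w ∈ t ∨ w = a := by simpa [pvFin] using hw
                apply hacc
                rcases hw' with h | h
                · exact List.mem_cons_of_mem _ h
                · simp [h]
            simp only [List.isEmpty_nil, List.isEmpty_cons, Bool.not_false, Bool.true_and]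
            rw [List.isEmpty_eq_false_iff.mpr hne]
            simp
        rw [e2]
        exact ih [] acc hacc
      · have hc : cur ≠ [] := by simpa using hcur
        have e1 : PySem.Chars.split₀.go (c :: rest) cur acc
            = PySem.Chars.split₀.go rest [] (cur.reverse :: acc) := by
          simp [PySem.Chars.split₀.go, hsp, List.isEmpty_eq_false_iff.mpr hc]
        rw [e1, List.foldl_cons]
        have hacc' : ∀ w ∈ cur.reverse :: acc, w ≠ [] := by
          intro w hw
          rcases List.mem_cons.mp hw with h | h
          · subst h; simpa using hc
          · exact hacc w h
        have hfin : pvFin cur acc = pvFin [] (cur.reverse :: acc) := by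
          simp [pvFin, List.isEmpty_eq_false_iff.mpr hc]
        have hne : PySem.Chars.join ['-'] (pvFin cur acc) ≠ [] := by
          apply pv_join_ne_nil
          · simp [pvFin, List.isEmpty_eq_false_iff.mpr hc]
          · intro w hw
            have hw' : w ∈ acc ∨ w = cur.reverse := by simpa [pvFin, hc] using hw
            rcases hw' with h | h
            · exact hacc w h
            · subst h; simpa using hc
        have e2 : pvStepB (PySem.Chars.join ['-'] (pvFin cur acc), cur.isEmpty && !acc.isEmpty) c
            = (PySem.Chars.join ['-'] (pvFin ([] : List Char) (cur.reverse :: acc)),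
               List.isEmpty ([] : List Char) && !(cur.reverse :: acc).isEmpty) := by
          have hne2 : PySem.Chars.join ['-'] (pvFin ([] : List Char) (cur.reverse :: acc)) ≠ [] := by
            rw [← hfin]; exact hne
          simp only [pvStepB, hsp, if_true, hfin]
          rw [List.isEmpty_eq_false_iff.mpr hne2]
          simp
        rw [e2]
        exact ih [] (cur.reverse :: acc) hacc'
    · have hspf : PySem.Chars.isspace c = false := by simpa using hsp
      have e1 : PySem.Chars.split₀.go (c :: rest) cur acc = PySem.Chars.split₀.go rest (c :: cur) acc := by
        simp [PySem.Chars.split₀.go, hspf]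
      rw [e1, List.foldl_cons]
      have e2 : pvStepB (PySem.Chars.join ['-'] (pvFin cur acc), cur.isEmpty && !acc.isEmpty) c
          = (PySem.Chars.join ['-'] (pvFin (c :: cur) acc), (c :: cur).isEmpty && !acc.isEmpty) := by
        simp only [pvStepB, hspf, Bool.false_eq_true, if_false, List.isEmpty_cons, Bool.false_and]
        by_cases hcur : cur.isEmpty
        · have hcur' : cur = [] := by simpa using hcur
          subst hcur'
          cases acc with
          | nil => simp [pvFin, PySem.Chars.join_singleton]
          | cons a t =>
            have hrev : ((a :: t) : List (List Char)).reverse ≠ [] := by simp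
            simp only [pvFin, List.isEmpty_nil, List.isEmpty_cons, if_true, Bool.not_false, Bool.true_and]
            rw [if_neg (by simp)]
            have : (([c].reverse :: (a :: t)) : List (List Char)).reverse = (a :: t).reverse ++ [[c]] := by simp
            rw [this, pv_join_append_singleton _ _ (by simp)]
            simp
        · have hc : cur ≠ [] := by simpa using hcur
          simp only [pvFin, List.isEmpty_eq_false_iff.mpr hc, Bool.false_and, Bool.false_eq_true, if_false, List.isEmpty_eq_false_iff.mpr (by simp : ((c :: cur)) ≠ [])]
          have h1 : ((cur.reverse :: acc) : List (List Char)).reverse = acc.reverse ++ [cur.reverse] := by simp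
          have h2 : (((c :: cur).reverse :: acc) : List (List Char)).reverse = acc.reverse ++ [cur.reverse ++ [c]] := by simp
          rw [h1, h2]
          cases acc with
          | nil => simp [PySem.Chars.join_singleton]
          | cons a t =>
            rw [pv_join_append_singleton _ _ (by simp), pv_join_append_singleton _ _ (by simp)]
            simp
      rw [e2]
      exact ih (c :: cur) acc hacc

theorem pv_fold_eq_join_split (cs : List Char) :
    (cs.foldl pvStepB ([], false)).1 = PySem.Chars.join ['-'] (PySem.Chars.split₀ cs) := by
  have := pv_main cs [] [] (by simp)
  simpa [pvFin, PySem.Chars.join_nil, PySem.Chars.split₀] using this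

-- trailing whitespace is ignored by go
theorem pv_go_ws (ws : List Char) : ∀ (cur : List Char) (acc : List (List Char)), (∀ c ∈ ws, PySem.Chars.isspace c = true) →
    PySem.Chars.split₀.go ws cur acc = PySem.Chars.split₀.go [] cur acc := by
  induction ws with
  | nil => intro cur acc _; rfl
  | cons c rest ih =>
    intro cur acc hws
    have hc := hws c (by simp)
    by_cases hcur : cur.isEmpty
    · have hcur' : cur = [] := by simpa using hcur
      subst hcur'
      have e : PySem.Chars.split₀.go (c :: rest) [] acc = PySem.Chars.split₀.go rest [] acc := by
        simp [PySem.Chars.split₀.go, hc]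
      rw [e, ih [] acc (fun d hd => hws d (by simp [hd]))]
    · have hcn : cur ≠ [] := by simpa using hcur
      have e : PySem.Chars.split₀.go (c :: rest) cur acc = PySem.Chars.split₀.go rest [] (cur.reverse :: acc) := by
        simp [PySem.Chars.split₀.go, hc, List.isEmpty_eq_false_iff.mpr hcn]
      rw [e, ih [] (cur.reverse :: acc) (fun d hd => hws d (by simp [hd]))]
      simp [PySem.Chars.split₀.go, List.isEmpty_eq_false_iff.mpr hcn]

theorem pv_go_append_ws (xs ws : List Char) (hws : ∀ c ∈ ws, PySem.Chars.isspace c = true) :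
    ∀ (cur : List Char) (acc : List (List Char)),
    PySem.Chars.split₀.go (xs ++ ws) cur acc = PySem.Chars.split₀.go xs cur acc := by
  induction xs with
  | nil =>
    intro cur acc
    simpa using pv_go_ws ws cur acc hws
  | cons c rest ih =>
    intro cur acc
    by_cases hsp : PySem.Chars.isspace c = true
    · by_cases hcur : cur.isEmpty
      · have hcur' : cur = [] := by simpa using hcur
        subst hcur'
        simp only [List.cons_append, PySem.Chars.split₀.go, hsp, if_true, List.isEmpty_nil]
        exact ih [] acc
      · have hcn : cur ≠ [] := by simpa using hcur
        simp only [List.cons_append, PySem.Chars.split₀.go, hsp, if_true, List.isEmpty_eq_false_iff.mpr hcn, Bool.false_eq_true, if_false]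
        exact ih [] (cur.reverse :: acc)
    · have hspf : PySem.Chars.isspace c = false := by simpa using hsp
      simp only [List.cons_append, PySem.Chars.split₀.go, hspf, Bool.false_eq_true, if_false]
      exact ih (c :: cur) acc

theorem pv_split_rstrip (ds : List Char) :
    PySem.Chars.split₀ (PySem.Chars.rstrip ds) = PySem.Chars.split₀ ds := by
  have hdecomp : ds = PySem.Chars.rstrip ds ++ (List.takeWhile PySem.Chars.isspace ds.reverse).reverse := by
    conv_lhs => rw [← List.reverse_reverse ds, ← List.takeWhile_append_dropWhile (p := PySem.Chars.isspace) (l := ds.reverse)]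
    rw [List.reverse_append]
    rfl
  have hws : ∀ c ∈ (List.takeWhile PySem.Chars.isspace ds.reverse).reverse, PySem.Chars.isspace c = true := by
    intro c hc
    exact List.mem_takeWhile_imp (List.mem_reverse.mp hc)
  conv_rhs => rw [hdecomp]
  unfold PySem.Chars.split₀
  rw [pv_go_append_ws _ _ hws]

theorem pv_split_lstrip (ds : List Char) :
    PySem.Chars.split₀ (PySem.Chars.lstrip ds) = PySem.Chars.split₀ ds := by
  induction ds with
  | nil => rfl
  | cons c rest ih =>
    by_cases hsp : PySem.Chars.isspace c = true
    · have e1 : PySem.Chars.lstrip (c :: rest) = PySem.Chars.lstrip rest := by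
        simp [PySem.Chars.lstrip, hsp]
      have e2 : PySem.Chars.split₀ (c :: rest) = PySem.Chars.split₀ rest := by
        simp [PySem.Chars.split₀, PySem.Chars.split₀.go, hsp]
      rw [e1, e2, ih]
    · have hspf : PySem.Chars.isspace c = false := by simpa using hsp
      have e1 : PySem.Chars.lstrip (c :: rest) = c :: rest := by
        simp [PySem.Chars.lstrip, hspf]
      rw [e1]

-- lower commutes with strip, so A's strip before lowering can be moved inside
theorem pv_lower_strip (cs : List Char) :
    PySem.Chars.lower (PySem.Chars.strip cs) = PySem.Chars.strip (PySem.Chars.lower cs) := by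
  have hpred : (PySem.Chars.isspace ∘ PySem.Chars.lowerChar) = PySem.Chars.isspace := by
    funext c; exact pv_isspace_lowerChar c
  simp only [PySem.Chars.strip, PySem.Chars.lower, PySem.Chars.lstrip, PySem.Chars.rstrip]
  rw [List.dropWhile_map, hpred, ← List.map_reverse, List.dropWhile_map, hpred, List.map_reverse]

theorem pv_value_eq (r : String) :
    (PySem.Str.join "-" (PySem.Str.split₀ (PySem.Str.lower (PySem.Str.strip r)))).toList
      = ((PySem.Str.lower r).toList.foldl pvStepB ([], false)).1 := by
  rw [PySem.Str.toList_join, PySem.Str.split₀_map_toList, PySem.Str.toList_lower, PySem.Str.toList_strip]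
  rw [pv_lower_strip, PySem.Chars.strip]
  rw [pv_split_rstrip, pv_split_lstrip]
  rw [pv_fold_eq_join_split, PySem.Str.toList_lower]
  rfl

theorem pvScan_none (v : String) (fs : List (List (String × String)))
    (h : v ∉ fs.filterMap (fun e =>
        match pvGetPid e with
        | some p => if p ≠ "" then some p else none
        | none => none)) : pvScanB v fs = none := by
  induction fs with
  | nil => rfl
  | cons e rest ih =>
    simp only [List.filterMap_cons] at h
    simp only [pvScanB]
    cases hp : pvGetPid e with
    | none =>
      rw [hp] at h
      exact ih h
    | some p =>
      rw [hp] at h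
      by_cases hpe : p = ""
      · simp only [hpe] at h ⊢
        simp only [ne_eq, not_true_eq_false, if_false] at h ⊢
        exact ih h
      · simp only [ne_eq, hpe, not_false_eq_true, if_true, List.mem_cons, not_or] at h
        simp only [hpe, ne_eq, not_false_eq_true, true_and]
        rw [if_neg (fun hv => h.1 hv.symm)]
        exact ih h.2

theorem pvScan_mem (v : String) (fs : List (List (String × String)))
    (h : v ∈ fs.filterMap (fun e =>
        match pvGetPid e with
        | some p => if p ≠ "" then some p else none
        | none => none)) : pvScanB v fs = some v := by
  induction fs with
  | nil => simp at h
  | cons e rest ih =>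
    simp only [List.filterMap_cons] at h
    simp only [pvScanB]
    cases hp : pvGetPid e with
    | none =>
      rw [hp] at h
      exact ih h
    | some p =>
      rw [hp] at h
      by_cases hpe : p = ""
      · simp only [hpe, ne_eq, not_true_eq_false, if_false] at h ⊢
        simp only [false_and, if_false]
        exact ih h
      · simp only [ne_eq, hpe, not_false_eq_true, if_true, List.mem_cons] at h
        rcases h with h | h
        · simp [hpe, h]
        · by_cases hv : p = v
          · subst hv; simp [hpe]
          · simp only [hpe, ne_eq, not_false_eq_true, true_and, if_neg hv]
            exact ih h

-- ===== VERDICT (by name: the statement is the Claim_ definition above) =====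
theorem resolve_platform_id_py_spec : Claim_equal_resolve_platform_id_py := by
  intro raw formats _
  unfold Spec_resolve_platform_id_py resolve_platform_id_py resolve_platform_id_py_alt
  cases raw with
  | none => rfl
  | some r =>
    by_cases hr : r = ""
    · simp [hr]
    · simp only [hr, if_false]
      have hval := pv_value_eq r
      set vA := PySem.Str.join "-" (PySem.Str.split₀ (PySem.Str.lower (PySem.Str.strip r))) with hvA
      set out := ((PySem.Str.lower r).toList.foldl pvStepB ([], false)).1 with hout
      have hmk : vA = String.ofList out := by
        apply String.toList_inj.mp
        rw [String.toList_ofList, hval]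
      by_cases hv0 : vA = ""
      · have : out = [] := by
          rw [← hval, hv0]; simp
        simp [hv0, this]
      · have hoe : out.isEmpty = false := by
          apply List.isEmpty_eq_false_iff.mpr
          intro hc
          apply hv0
          rw [hmk, hc]
        simp only [hv0, if_false, hoe, Bool.false_eq_true, if_false]
        rw [← hmk]
        split
        next hm => exact (pvScan_mem _ _ ((PySem.Set.mem_ofList _ _).mp hm)).symm
        next hm => exact (pvScan_none _ _ (fun hc => hm ((PySem.Set.mem_ofList _ _).mpr hc))).symm
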